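-- pv_equiv track=rewrite | github.com/max1ego/lab4-Milevskyi-Max | lab5.2.py | will_fit
-- ===== SOURCE A (Python) =====
-- def will_fit(a, b, c, m, n):
--
--     min_hole_side = min(m, n)
--     max_hole_side = max(m, n)
--
--     orientations = [
--         (a, b),
--         (a, c),
--         (b, c)
--     ]
--
--     for width, height in orientations:
--         if min(width, height) <= min_hole_side and max(width, height) <= max_hole_side:
--             return True
--
--     return False
-- ===== SOURCE B (Python) =====
-- def will_fit(a, b, c, m, n):
--     # The box passes through iff its smallest face fits the hole:
--     # take the two smallest of the three dimensions, no orientation loop.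
--     lo = min(a, b, c)
--     mid = a + b + c - lo - max(a, b, c)
--     return lo <= min(m, n) and mid <= max(m, n)
-- ===== Notes on version B (the rewrite author's own statement) =====
-- stated objective: simpler
-- what changed: Replaces the loop over the three face orientations with a closed-form check: compute the two smallest box dimensions via min/max arithmetic and compare them once against the sorted hole sides.
import Mathlib
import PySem

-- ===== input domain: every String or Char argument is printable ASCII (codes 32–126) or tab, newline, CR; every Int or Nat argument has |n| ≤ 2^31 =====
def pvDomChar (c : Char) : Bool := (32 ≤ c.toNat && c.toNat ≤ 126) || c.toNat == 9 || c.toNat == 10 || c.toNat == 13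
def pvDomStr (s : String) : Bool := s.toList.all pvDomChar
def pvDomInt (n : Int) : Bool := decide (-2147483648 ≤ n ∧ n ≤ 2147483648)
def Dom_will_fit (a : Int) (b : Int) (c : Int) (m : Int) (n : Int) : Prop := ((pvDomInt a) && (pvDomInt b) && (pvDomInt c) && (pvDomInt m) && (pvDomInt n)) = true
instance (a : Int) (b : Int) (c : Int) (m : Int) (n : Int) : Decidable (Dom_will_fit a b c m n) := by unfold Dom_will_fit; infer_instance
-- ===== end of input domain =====

-- B replaces A's loop over the three face orientations with a single closed-form
-- check of the two smallest box dimensions against the sorted hole sides (simpler).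


-- ===== PORT A =====
-- the 'for width, height in orientations: … return True' loop with early return
def willFitLoop (minHole maxHole : Int) : List (Int × Int) → Bool
  | [] => false
  | (w, h) :: rest =>
      if min w h ≤ minHole && max w h ≤ maxHole then true
      else willFitLoop minHole maxHole rest

def will_fit (a : Int) (b : Int) (c : Int) (m : Int) (n : Int) : Bool :=
  let min_hole_side := min m n
  let max_hole_side := max m n
  let orientations := [(a, b), (a, c), (b, c)]
  willFitLoop min_hole_side max_hole_side orientations

-- ===== PORT B =====
def will_fit_alt (a : Int) (b : Int) (c : Int) (m : Int) (n : Int) : Bool :=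
  let lo := min a (min b c)
  let mid := a + b + c - lo - max a (max b c)
  lo ≤ min m n && mid ≤ max m n

-- ===== PRECONDITION & SPEC =====
def Spec_will_fit (a : Int) (b : Int) (c : Int) (m : Int) (n : Int) (out : Bool) : Prop := out = will_fit_alt a b c m n
instance (a : Int) (b : Int) (c : Int) (m : Int) (n : Int) (out : Bool) : Decidable (Spec_will_fit a b c m n out) := by unfold Spec_will_fit; infer_instance

-- ===== CLAIM (what is proved, stated in full; the proofs are below) =====
def Claim_equal_will_fit : Prop := ∀ (a : Int) (b : Int) (c : Int) (m : Int) (n : Int), Dom_will_fit a b c m n → Spec_will_fit a b c m n (will_fit a b c m n)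

-- ===== LEMMAS AND PROOFS =====

-- ===== VERDICT (by name: the statement is the Claim_ definition above) =====
theorem will_fit_spec : Claim_equal_will_fit := by
  intro a b c m n _
  unfold Spec_will_fit
  simp only [will_fit, will_fit_alt, willFitLoop]
  rw [Bool.eq_iff_iff]
  simp only [Bool.if_true_left, Bool.or_eq_true, Bool.and_eq_true, decide_eq_true_eq,
    Bool.false_eq_true, or_false]
  omega
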